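-- pv_equiv track=rewrite | github.com/AthosFB/Exercicios-Python | ExercícioDoCurso/venv/Lib/site-packages/math2/utils.py | iter_equal
-- ===== SOURCE A (Python) =====
-- from collections.abc import Collection, Hashable, Iterable, Iterator, Sequence
-- from typing import Any, Optional, cast
--
-- def iter_equal(it1: Iterable[Any], it2: Iterable[Any]) -> bool:
--     """Checks if all elements in both iterables are equal to the elements in the other iterable at the same position.
--
--     :param it1: The first iterable.
--     :param it2: The second iterable.
--     :return: True if the equality check passes, else False.
--     """
--     if isinstance(it1, Collection) and isinstance(it2, Collection):
--         return len(it1) == len(it2) and all(x == y for x, y in zip(it1, it2))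
--     elif isinstance(it1, Collection):
--         return iter_equal(it1, tuple(it2))
--     elif isinstance(it2, Collection):
--         return iter_equal(tuple(it1), it2)
--     else:
--         return iter_equal(tuple(it1), tuple(it2))
-- ===== SOURCE B (Python) =====
-- import itertools
--
-- _MISSING = object()
--
-- def iter_equal(it1, it2):
--     return all(a == b for a, b in itertools.zip_longest(it1, it2, fillvalue=_MISSING))
-- ===== Notes on version B (the rewrite author's own statement) =====
-- stated objective: idiomatic
-- what changed: Replaces the len() precheck plus zip with a single simultaneous pass via itertools.zip_longest and a unique sentinel, dropping the isinstance(Collection) branching and tuple normalization entirely.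
import Mathlib
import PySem

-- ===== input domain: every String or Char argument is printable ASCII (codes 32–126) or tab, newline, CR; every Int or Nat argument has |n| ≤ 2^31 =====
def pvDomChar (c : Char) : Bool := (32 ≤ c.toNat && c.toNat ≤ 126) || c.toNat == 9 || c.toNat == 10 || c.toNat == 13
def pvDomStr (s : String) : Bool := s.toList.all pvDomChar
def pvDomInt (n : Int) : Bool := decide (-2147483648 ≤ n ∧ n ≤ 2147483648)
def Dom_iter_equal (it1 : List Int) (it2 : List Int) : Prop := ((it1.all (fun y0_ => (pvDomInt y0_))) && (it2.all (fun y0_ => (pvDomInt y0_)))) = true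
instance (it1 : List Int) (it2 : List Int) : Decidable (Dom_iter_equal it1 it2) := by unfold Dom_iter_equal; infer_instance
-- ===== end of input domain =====

-- B replaces A's length precheck + zip with one simultaneous sentinel-padded pass (zip_longest); equal return value, idiomatic.

-- ===== PORT A =====
-- len(it1) == len(it2) and all(x == y for x, y in zip(it1, it2))
def iter_equal (it1 : List Int) (it2 : List Int) : Bool :=
  (it1.length == it2.length) && ((it1.zip it2).all (fun p => p.1 == p.2))

-- ===== PORT B =====
-- zip_longest with a unique fill sentinel: an unmatched position pairs an element with
-- the sentinel, which compares unequal. Ported as simultaneous recursion on both lists: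
-- both empty → all pairs passed; one empty → sentinel pair, unequal → false; else compare heads.
def iter_equal_alt (it1 : List Int) (it2 : List Int) : Bool :=
  match it1, it2 with
  | [], [] => true
  | x :: xs, y :: ys => (x == y) && iter_equal_alt xs ys
  | _, _ => false

-- ===== PRECONDITION & SPEC =====
def Spec_iter_equal (it1 : List Int) (it2 : List Int) (out : Bool) : Prop := out = iter_equal_alt it1 it2
instance (it1 : List Int) (it2 : List Int) (out : Bool) : Decidable (Spec_iter_equal it1 it2 out) := by unfold Spec_iter_equal; infer_instance

-- ===== CLAIM (what is proved, stated in full; the proofs are below) =====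
def Claim_equal_iter_equal : Prop := ∀ (it1 : List Int) (it2 : List Int), Dom_iter_equal it1 it2 → Spec_iter_equal it1 it2 (iter_equal it1 it2)

-- ===== LEMMAS AND PROOFS =====
theorem iter_equal_eq_alt : ∀ (it1 it2 : List Int), iter_equal it1 it2 = iter_equal_alt it1 it2 := by
  intro it1
  induction it1 with
  | nil =>
    intro it2; cases it2 <;> simp [iter_equal, iter_equal_alt]
  | cons x xs ih =>
    intro it2
    cases it2 with
    | nil => simp [iter_equal, iter_equal_alt]
    | cons y ys =>
      have h := ih ys
      simp [iter_equal, iter_equal_alt] at h ⊢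
      cases hxy : (x == y) with
      | false => simp
      | true => simpa using h

-- ===== VERDICT (by name: the statement is the Claim_ definition above) =====
theorem iter_equal_spec : Claim_equal_iter_equal := by
  intro it1 it2 _
  unfold Spec_iter_equal
  exact iter_equal_eq_alt it1 it2
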